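-- pv_equiv track=rewrite | github.com/Alf01100111/Pythonprog | hw5/task 2.py | ht
-- ===== SOURCE A (Python) =====
-- def ht(num)->list:
--     nums = [n for n in range(num)]
--     res = []
--     for i in range(len(nums)):
--         if nums[i] % 2 == 0:
--             res.append(1)
--         else: res.append(2)
--     return res
-- ===== SOURCE B (Python) =====
-- def ht(num) -> list:
--     return ([1, 2] * ((num + 1) // 2))[:num]
-- ===== Notes on version B (the rewrite author's own statement) =====
-- stated objective: idiomatic
-- what changed: Replaces the index loop with its per-element parity test by tiling the two-element block [1,2] ceil(num/2) times and slicing to length num.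
import Mathlib
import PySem

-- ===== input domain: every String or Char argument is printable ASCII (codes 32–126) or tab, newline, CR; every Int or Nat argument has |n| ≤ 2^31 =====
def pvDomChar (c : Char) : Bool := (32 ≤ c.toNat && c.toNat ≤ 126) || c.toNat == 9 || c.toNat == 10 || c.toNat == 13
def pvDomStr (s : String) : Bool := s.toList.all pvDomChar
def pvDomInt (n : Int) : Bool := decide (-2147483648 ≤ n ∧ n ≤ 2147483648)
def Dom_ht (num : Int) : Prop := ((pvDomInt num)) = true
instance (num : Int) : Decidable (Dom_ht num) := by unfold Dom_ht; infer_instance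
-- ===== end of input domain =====

-- B replaces the per-index parity loop by tiling the block [1,2] and slicing to length (idiomatic).


-- ===== PORT A =====
def ht (num : Int) : List Int :=
  let nums := PySem.List.pyRange 0 num 1
  let res : List Int := []
  (PySem.List.pyRange 0 (nums.length : Int) 1).foldl
    (fun res i =>
      if PySem.Int.mod (PySem.List.pyGetD nums i 0) 2 = 0 then res ++ [1] else res ++ [2])
    res

-- ===== PORT B =====
-- [1, 2] * k  (k copies of the block; k ≤ 0 gives [])
def htRepBlock : Nat → List Int
  | 0 => []
  | n + 1 => [1, 2] ++ htRepBlock n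

def ht_alt (num : Int) : List Int :=
  PySem.List.slice (htRepBlock (PySem.Int.floordiv (num + 1) 2).toNat) none (some num)

-- ===== PRECONDITION & SPEC =====
def Spec_ht (num : Int) (out : List Int) : Prop := out = ht_alt num
instance (num : Int) (out : List Int) : Decidable (Spec_ht num out) := by unfold Spec_ht; infer_instance

-- ===== CLAIM (what is proved, stated in full; the proofs are below) =====
def Claim_equal_ht : Prop := ∀ (num : Int), Dom_ht num → Spec_ht num (ht num)

-- ===== LEMMAS AND PROOFS =====

def htPat (k : Nat) : Int := if k % 2 = 0 then 1 else 2

lemma htRepBlock_eq (m : Nat) : htRepBlock m = (List.range (2 * m)).map htPat := by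
  induction m with
  | zero => simp [htRepBlock]
  | succ n ih =>
    have h2 : 2 * (n + 1) = (2 * n + 1) + 1 := by ring
    rw [htRepBlock, ih, h2, List.range_succ_eq_map, List.range_succ_eq_map]
    simp [List.map_map, Function.comp, htPat]
    intro a _
    have h3 : (a + 1 + 1) % 2 = a % 2 := by omega
    simp only [h3]

lemma ht_eq_map (n : Nat) : ht (n : Int) = (List.range n).map htPat := by
  simp only [ht]
  rw [PySem.List.foldl_pyRange_zero_pyGetD' (PySem.List.pyRange 0 (n : Int) 1) 0
      (fun res x => if PySem.Int.mod x 2 = 0 then res ++ [(1:Int)] else res ++ [2]) []]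
  rw [PySem.List.pyRange_zero_nat]
  rw [List.foldl_map]
  rw [show ((fun (res : List Int) (k : Nat) => if PySem.Int.mod ((k : Int)) 2 = 0 then res ++ [(1:Int)] else res ++ [2]))
      = (fun res k => res ++ [htPat k]) from by
    funext res k
    have hm : PySem.Int.mod ((k : Int)) 2 = ((k % 2 : Nat) : Int) := by
      exact_mod_cast PySem.Int.mod_natCast k 2
    rw [hm, htPat]
    by_cases h : k % 2 = 0
    · simp [h]
    · simp [h]
      omega]
  rw [PySem.List.foldl_append_singleton_eq_map]
  simp

lemma ht_alt_eq_map (n : Nat) : ht_alt (n : Int) = (List.range n).map htPat := by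
  unfold ht_alt
  have h2 : PySem.Int.floordiv ((n : Int) + 1) 2 = (((n + 1) / 2 : Nat) : Int) := by
    exact_mod_cast PySem.Int.floordiv_natCast (n + 1) 2
  rw [h2, Int.toNat_natCast, htRepBlock_eq, PySem.List.slice_to_natCast,
      ← List.map_take, List.take_range]
  have : min n (2 * ((n + 1) / 2)) = n := by omega
  rw [this]

lemma ht_neg_eq_nil (num : Int) (h : num < 0) : ht num = [] := by
  unfold ht
  rw [PySem.List.pyRange_one_eq_nil (by omega)]
  simp [PySem.List.pyRange_one_eq_nil]

lemma ht_alt_neg_eq_nil (num : Int) (h : num < 0) : ht_alt num = [] := by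
  unfold ht_alt
  have hk : (PySem.Int.floordiv (num + 1) 2).toNat = 0 := by
    have hle : PySem.Int.floordiv (num + 1) 2 ≤ 0 := by
      have := PySem.Int.floordiv_eq_ediv_of_pos (a := num + 1) (b := 2) (by omega)
      rw [this]; omega
    omega
  rw [hk]
  simp [htRepBlock, PySem.List.slice]

-- ===== VERDICT (by name: the statement is the Claim_ definition above) =====
theorem ht_spec : Claim_equal_ht := by
  intro num _
  unfold Spec_ht
  rcases lt_or_ge num 0 with h | h
  · rw [ht_neg_eq_nil num h, ht_alt_neg_eq_nil num h]
  · obtain ⟨n, rfl⟩ : ∃ n : Nat, num = (n : Int) := ⟨num.toNat, (Int.toNat_of_nonneg h).symm⟩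
    rw [ht_eq_map, ht_alt_eq_map]
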